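-- pv_equiv track=rewrite | github.com/CowDavid/pytorch-chatbot-hierarchical | train.py | pairs_transform
-- ===== SOURCE A (Python) =====
-- def pairs_transform(pairs):
--     new_pairs = []
--     new_pair = []
--     output_seq = []
--     #start_of_group = 0
--     count = 0
--     #out_seq2in_index= {}
--     pair_buf = []
--     for pair in pairs:
--         for i in range(len(pair)-1):
--             input_seq = str(count) + ' ' + pair[i]#add index of the seq at the top of the seq
--             new_pair.append(input_seq.strip())
--             new_pair.append(pair[i+1].strip())
--             pair_buf.append(new_pair)
--             #out_seq2in_index[new_pair[1]] = [i for i in range(start_of_group, count + 1)]# count = the index of pair(unsorted) now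
--             new_pair = []
--             count += 1
--         #start_of_group = count
--         new_pairs.append(pair_buf)
--         pair_buf = []
--     #new_pairs= [ [ [A1,A2], [A2,A3], [A3,A4] ] , [ [B1,B2] ],...]
--     return new_pairs #, out_seq2in_index
-- ===== SOURCE B (Python) =====
-- def pairs_transform(pairs):
--     # Precompute group sizes and exclusive prefix-sum offsets, then build each
--     # group independently from its base offset (no running counter threaded through).
--     sizes = [max(len(p) - 1, 0) for p in pairs]
--     offsets = []
--     total = 0
--     for s in sizes:
--         offsets.append(total)
--         total += s
--     return [
--         [[(str(base + i) + ' ' + p[i]).strip(), p[i + 1].strip()]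
--          for i in range(len(p) - 1)]
--         for base, p in zip(offsets, pairs)
--     ]
-- ===== Notes on version B (the rewrite author's own statement) =====
-- stated objective: alternative
-- what changed: Replaces the single stateful pass that threads a mutable global counter and a pair buffer through nested loops by a two-phase construction: first compute group sizes and their exclusive prefix-sum offsets, then build every group independently by pure comprehensions indexed from its base offset.
import Mathlib
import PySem

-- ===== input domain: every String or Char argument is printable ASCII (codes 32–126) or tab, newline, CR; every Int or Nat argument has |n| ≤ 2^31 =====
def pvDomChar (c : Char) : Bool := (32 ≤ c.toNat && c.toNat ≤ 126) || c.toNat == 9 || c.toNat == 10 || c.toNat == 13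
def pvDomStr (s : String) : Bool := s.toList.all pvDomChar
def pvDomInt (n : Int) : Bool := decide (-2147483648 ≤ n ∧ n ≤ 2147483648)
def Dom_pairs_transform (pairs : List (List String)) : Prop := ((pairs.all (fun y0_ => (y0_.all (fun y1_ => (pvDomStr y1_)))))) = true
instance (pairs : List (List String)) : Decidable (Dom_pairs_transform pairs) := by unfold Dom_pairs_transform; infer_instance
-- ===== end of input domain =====

-- B replaces A's single stateful counter-threading pass by prefix-sum offsets plus independent per-group construction (alternative decomposition, same cost).


-- ===== PORT A =====
-- inner loop body: new_pair = [(str(count)+' '+pair[i]).strip(), pair[i+1].strip()]; pair_buf.append(new_pair); count += 1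
def pvInnerA (pair : List String) (st2 : List (List String) × Int) (i : Int) : List (List String) × Int :=
  let input_seq := String.ofList (PySem.Int.toChars st2.2 ++ ' ' :: (PySem.List.pyGetD pair i "").toList)
  (st2.1 ++ [[PySem.Str.strip input_seq, PySem.Str.strip (PySem.List.pyGetD pair (i + 1) "")]], st2.2 + 1)

-- outer loop body: run the inner loop with a fresh pair_buf, append it to new_pairs, keep count
def pvOuterA (st : List (List (List String)) × Int) (pair : List String) : List (List (List String)) × Int :=
  let inner := (PySem.List.pyRange 0 ((pair.length : Int) - 1) 1).foldl (pvInnerA pair) ([], st.2)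
  (st.1 ++ [inner.1], inner.2)

def pairs_transform (pairs : List (List String)) : List (List (List String)) :=
  (pairs.foldl pvOuterA ([], 0)).1

-- ===== PORT B =====
-- group built from its base offset: [[(str(base+i)+' '+p[i]).strip(), p[i+1].strip()] for i in range(len(p)-1)]
def pvGroupB (base : Int) (p : List String) : List (List String) :=
  (PySem.List.pyRange 0 ((p.length : Int) - 1) 1).map (fun i =>
    [PySem.Str.strip (String.ofList (PySem.Int.toChars (base + i) ++ ' ' :: (PySem.List.pyGetD p i "").toList)),
     PySem.Str.strip (PySem.List.pyGetD p (i + 1) "")])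

def pairs_transform_alt (pairs : List (List String)) : List (List (List String)) :=
  let sizes := pairs.map (fun p => max ((p.length : Int) - 1) 0)
  let offsets := (sizes.foldl (fun (st : List Int × Int) s => (st.1 ++ [st.2], st.2 + s)) ([], 0)).1
  (offsets.zip pairs).map (fun bp => pvGroupB bp.1 bp.2)

-- ===== PRECONDITION & SPEC =====
def Spec_pairs_transform (pairs : List (List String)) (out : List (List (List String))) : Prop := out = pairs_transform_alt pairs
instance (pairs : List (List String)) (out : List (List (List String))) : Decidable (Spec_pairs_transform pairs out) := by unfold Spec_pairs_transform; infer_instance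

-- ===== CLAIM (what is proved, stated in full; the proofs are below) =====
def Claim_equal_pairs_transform : Prop := ∀ (pairs : List (List String)), Dom_pairs_transform pairs → Spec_pairs_transform pairs (pairs_transform pairs)

-- ===== LEMMAS AND PROOFS =====

-- exclusive prefix sums, the shape B's offsets loop produces
def pvScan (t : Int) : List Int → List Int
  | [] => []
  | s :: ss => t :: pvScan (t + s) ss

theorem pv_offsets (sizes : List Int) : ∀ (t : Int) (acc : List Int),
    (sizes.foldl (fun (st : List Int × Int) s => (st.1 ++ [st.2], st.2 + s)) (acc, t)).1
      = acc ++ pvScan t sizes := by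
  induction sizes with
  | nil => intro t acc; simp [pvScan]
  | cons s ss ih => intro t acc; simp [pvScan, List.foldl_cons, ih (t + s) (acc ++ [t])]

-- a counter-threading append loop over a range equals a base-offset map over the same range
theorem pv_inner_loop (pair : List String) :
    ∀ (n : Nat) (a b c : Int) (acc : List (List String)), (b - a).toNat = n →
    (PySem.List.pyRange a b 1).foldl (pvInnerA pair) (acc, c)
      = (acc ++ (PySem.List.pyRange a b 1).map (fun i =>
          [PySem.Str.strip (String.ofList (PySem.Int.toChars (c + (i - a)) ++ ' ' :: (PySem.List.pyGetD pair i "").toList)),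
           PySem.Str.strip (PySem.List.pyGetD pair (i + 1) "")]),
         c + ((b - a).toNat : Int)) := by
  intro n
  induction n with
  | zero =>
    intro a b c acc h
    rw [PySem.List.pyRange_one_eq_nil (by omega)]
    simp
    omega
  | succ n ih =>
    intro a b c acc h
    rw [PySem.List.pyRange_one_cons (by omega)]
    simp only [List.foldl_cons, List.map_cons, sub_self, add_zero, pvInnerA]
    rw [ih (a + 1) b (c + 1) _ (by omega)]
    have h1 : (fun (i : Int) =>
        [PySem.Str.strip (String.ofList (PySem.Int.toChars (c + 1 + (i - (a + 1))) ++ ' ' :: (PySem.List.pyGetD pair i "").toList)),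
         PySem.Str.strip (PySem.List.pyGetD pair (i + 1) "")])
      = (fun (i : Int) =>
        [PySem.Str.strip (String.ofList (PySem.Int.toChars (c + (i - a)) ++ ' ' :: (PySem.List.pyGetD pair i "").toList)),
         PySem.Str.strip (PySem.List.pyGetD pair (i + 1) "")]) := by
      funext i
      have : c + 1 + (i - (a + 1)) = c + (i - a) := by ring
      rw [this]
    have h2 : c + 1 + ((b - (a + 1)).toNat : Int) = c + ((b - a).toNat : Int) := by omega
    rw [h1, h2, List.append_assoc]
    rfl

-- the inner loop of A, started at count = c, builds exactly B's group with base c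
theorem pv_inner (pair : List String) (c : Int) :
    (PySem.List.pyRange 0 ((pair.length : Int) - 1) 1).foldl (pvInnerA pair) ([], c)
      = (pvGroupB c pair, c + max ((pair.length : Int) - 1) 0) := by
  rw [pv_inner_loop pair (((pair.length : Int) - 1) - 0).toNat 0 ((pair.length : Int) - 1) c [] rfl]
  simp only [Prod.mk.injEq]
  refine ⟨?_, by omega⟩
  simp [pvGroupB]

-- the outer loop of A, started at count = c, builds B's groups for offsets pvScan c
theorem pv_main (pairs : List (List String)) : ∀ (c : Int) (acc : List (List (List String))),
    (pairs.foldl pvOuterA (acc, c)).1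
      = acc ++ ((pvScan c (pairs.map (fun p => max ((p.length : Int) - 1) 0))).zip pairs).map
          (fun bp => pvGroupB bp.1 bp.2) := by
  induction pairs with
  | nil => intro c acc; simp [pvScan]
  | cons p ps ih =>
    intro c acc
    have hstep : pvOuterA (acc, c) p = (acc ++ [pvGroupB c p], c + max ((p.length : Int) - 1) 0) := by
      simp [pvOuterA, pv_inner p c]
    simp only [List.foldl_cons, hstep, List.map_cons, pvScan, List.zip_cons_cons]
    rw [ih (c + max ((p.length : Int) - 1) 0) (acc ++ [pvGroupB c p])]
    simp

-- ===== VERDICT (by name: the statement is the Claim_ definition above) =====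
theorem pairs_transform_spec : Claim_equal_pairs_transform := by
  intro pairs _
  unfold Spec_pairs_transform
  simp only [pairs_transform, pairs_transform_alt]
  rw [pv_main pairs 0 [], pv_offsets]
  simp
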